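-- pv_equiv track=rewrite | github.com/zoushucai/cfun | src/cfun/phrase.py | _generate_regex_patterns
-- ===== SOURCE A (Python) =====
-- import itertools
--
-- def _generate_regex_patterns(s, n=1):
--     assert isinstance(s, str), "s must be a string"
--     assert isinstance(n, int), "n must be an integer"
--     assert 1 <= n <= len(s), "n 必须在 1 和字符串长度之间"
--
--     patterns = []
--     # 获取所有可能的 n 个位置的组合
--     indices_combinations = itertools.combinations(range(len(s)), n)
--     # 对每个组合生成对应的正则表达式
--
--     for indices in indices_combinations:
--         # 创建一个列表,把原字符串变为可变的列表
--         # 用 '.' 替换这些位置的字符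
--         temp = list(s)
--         for index in indices:
--             temp[index] = "."
--
--         # 把列表重新合成字符串
--         patterns.append("".join(temp))
--     return patterns
-- ===== SOURCE B (Python) =====
-- def _generate_regex_patterns(s, n=1):
--     assert isinstance(s, str), "s must be a string"
--     assert isinstance(n, int), "n must be an integer"
--     assert 1 <= n <= len(s), "n 必须在 1 和字符串长度之间"
--
--     def rec(i, k, acc):
--         # prune: fewer remaining positions than dots still to place
--         if len(s) - i < k:
--             return []
--         if i == len(s):
--             return [acc]
--         out = []
--         if k > 0:
--             out += rec(i + 1, k - 1, acc + ".")
--         out += rec(i + 1, k, acc + s[i])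
--         return out
--
--     return rec(0, n, "")
-- ===== Notes on version B (the rewrite author's own statement) =====
-- stated objective: alternative
-- what changed: Replaces itertools.combinations over index tuples plus per-tuple list mutation/join with a pruned recursion that builds each pattern character-by-character, branching dot-first to keep the lexicographic order.
import Mathlib
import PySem

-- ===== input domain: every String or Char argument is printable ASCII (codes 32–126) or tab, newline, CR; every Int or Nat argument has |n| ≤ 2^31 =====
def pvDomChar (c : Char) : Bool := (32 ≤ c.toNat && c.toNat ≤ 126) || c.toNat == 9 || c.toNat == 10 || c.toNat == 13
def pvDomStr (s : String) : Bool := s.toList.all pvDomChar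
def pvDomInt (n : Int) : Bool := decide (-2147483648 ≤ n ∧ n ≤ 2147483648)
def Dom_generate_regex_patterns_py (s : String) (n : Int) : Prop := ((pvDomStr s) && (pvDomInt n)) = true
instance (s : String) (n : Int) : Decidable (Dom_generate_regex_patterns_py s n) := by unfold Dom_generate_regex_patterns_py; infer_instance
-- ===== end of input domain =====

-- B replaces the itertools.combinations index enumeration by a pruned dot-first recursion
-- building each pattern character-by-character (alternative decomposition, same cost).


-- ===== PORT A =====
-- port of itertools.combinations(xs, k): emits the k-subsequences in lexicographic order
def pyCombinations {α : Type} : Nat → List α → List (List α)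
  | 0, _ => [[]]
  | _ + 1, [] => []
  | k + 1, x :: xs => ((pyCombinations k xs).map (x :: ·)) ++ pyCombinations (k + 1) xs

def generate_regex_patterns_py (s : String) (n : Int) : List String :=
  if 1 ≤ n ∧ n ≤ (s.toList.length : Int) then
    -- for indices in combinations(range(len(s)), n): temp = list(s); temp[i] = '.'; join
    (pyCombinations n.toNat (List.range s.toList.length)).foldl
      (fun patterns indices =>
        patterns ++ [String.mk (indices.foldl (fun temp index => temp.set index '.') s.toList)])
      []
  else []  -- assert fails in Python (AssertionError): excluded by Pre_

-- ===== PORT B =====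
-- rec(i, k, acc) of Source B, with the suffix s[i:] as the list argument
def altRec : List Char → Nat → List Char → List (List Char)
  | [], k, acc => if ([] : List Char).length < k then [] else [acc]
  | c :: rest, k, acc =>
    if (c :: rest).length < k then []
    else (if 0 < k then altRec rest (k - 1) (acc ++ ['.']) else []) ++ altRec rest k (acc ++ [c])

def generate_regex_patterns_py_alt (s : String) (n : Int) : List String :=
  if 1 ≤ n ∧ n ≤ (s.toList.length : Int) then
    (altRec s.toList n.toNat []).map String.mk
  else []  -- assert fails in Python (AssertionError): excluded by Pre_

-- ===== PRECONDITION & SPEC =====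
-- Pre_ excludes exactly the inputs on which A's third assert fails (AssertionError): n < 1 or n > len(s)
def Pre_generate_regex_patterns_py (s : String) (n : Int) : Prop := 1 ≤ n ∧ n ≤ (s.toList.length : Int)
instance (s : String) (n : Int) : Decidable (Pre_generate_regex_patterns_py s n) := by unfold Pre_generate_regex_patterns_py; infer_instance
def pvWitness_generate_regex_patterns_py : String × Int := ("abc", 2)

def Spec_generate_regex_patterns_py (s : String) (n : Int) (out : List String) : Prop := out = generate_regex_patterns_py_alt s n
instance (s : String) (n : Int) (out : List String) : Decidable (Spec_generate_regex_patterns_py s n out) := by unfold Spec_generate_regex_patterns_py; infer_instance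

-- ===== CLAIM (what is proved, stated in full; the proofs are below) =====
def Claim_equal_generate_regex_patterns_py : Prop := ∀ (s : String) (n : Int), Dom_generate_regex_patterns_py s n → Pre_generate_regex_patterns_py s n → Spec_generate_regex_patterns_py s n (generate_regex_patterns_py s n)

-- ===== LEMMAS AND PROOFS =====

-- reference spec: the patterns of cs with k dots, in A's (lexicographic) order
def pats : Nat → List Char → List (List Char)
  | 0, cs => [cs]
  | _ + 1, [] => []
  | k + 1, c :: cs => ((pats k cs).map ('.' :: ·)) ++ ((pats (k + 1) cs).map (c :: ·))

theorem pats_nil_of_lt : ∀ (cs : List Char) (k : Nat), cs.length < k → pats k cs = [] := by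
  intro cs
  induction cs with
  | nil => intro k h; match k with
      | 0 => omega
      | k + 1 => rfl
  | cons c rest ih =>
    intro k h
    match k with
    | 0 => omega
    | k + 1 =>
      have h1 : rest.length < k := by simp at h; omega
      have h2 : rest.length < k + 1 := by omega
      simp [pats, ih k h1, ih (k + 1) h2]

theorem altRec_eq : ∀ (cs : List Char) (k : Nat) (acc : List Char),
    altRec cs k acc = (pats k cs).map (acc ++ ·) := by
  intro cs
  induction cs with
  | nil =>
    intro k acc
    match k with
    | 0 => simp [altRec, pats]
    | k + 1 => simp [altRec, pats]
  | cons c rest ih =>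
    intro k acc
    match k with
    | 0 => simp [altRec, pats, ih, List.append_assoc]
    | k + 1 =>
      by_cases hlt : (c :: rest).length < k + 1
      · have h1 : rest.length < k := by simp at hlt; omega
        rw [pats_nil_of_lt _ _ hlt]
        simp only [altRec, List.map_nil]
        rw [if_pos hlt]
      · simp only [altRec, if_neg hlt, if_pos (Nat.succ_pos k), Nat.add_sub_cancel]
        rw [ih, ih]
        simp [pats, List.map_map, Function.comp_def, List.append_assoc]

theorem combos_map {α β : Type} (f : α → β) : ∀ (k : Nat) (xs : List α),
    pyCombinations k (xs.map f) = (pyCombinations k xs).map (List.map f) := by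
  intro k xs
  induction xs generalizing k with
  | nil =>
    match k with
    | 0 => rfl
    | k + 1 => rfl
  | cons x rest ih =>
    match k with
    | 0 => rfl
    | k + 1 => simp [pyCombinations, ih, List.map_map, Function.comp]

theorem setDots_shift (c : Char) : ∀ (is : List Nat) (cs : List Char),
    (is.map Nat.succ).foldl (fun t i => t.set i '.') (c :: cs)
      = c :: is.foldl (fun t i => t.set i '.') cs := by
  intro is
  induction is with
  | nil => intro cs; rfl
  | cons i rest ih => intro cs; simp [List.foldl, ih]

theorem combos_range_pats : ∀ (cs : List Char) (k : Nat),
    (pyCombinations k (List.range cs.length)).map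
        (fun is => is.foldl (fun t i => t.set i '.') cs) = pats k cs := by
  intro cs
  induction cs with
  | nil =>
    intro k
    match k with
    | 0 => rfl
    | k + 1 => rfl
  | cons c rest ih =>
    intro k
    match k with
    | 0 => simp [pyCombinations, pats]
    | k + 1 =>
      rw [show (c :: rest).length = rest.length + 1 from rfl, List.range_succ_eq_map]
      simp only [pyCombinations, combos_map, List.map_append, List.map_map]
      rw [pats]
      congr 1
      · rw [← ih k]
        simp only [List.map_map]
        apply List.map_congr_left
        intro is _
        simp only [Function.comp_def, List.foldl]
        exact setDots_shift '.' is rest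
      · rw [← ih (k + 1)]
        simp only [List.map_map]
        apply List.map_congr_left
        intro is _
        simp only [Function.comp_def]
        exact setDots_shift c is rest

theorem foldl_append_map {α β : Type} (f : α → β) :
    ∀ (xs : List α) (init : List β),
      xs.foldl (fun acc x => acc ++ [f x]) init = init ++ xs.map f := by
  intro xs
  induction xs with
  | nil => intro init; simp
  | cons x rest ih => intro init; simp [List.foldl, ih]

-- ===== VERDICT (by name: the statement is the Claim_ definition above) =====
theorem generate_regex_patterns_py_spec : Claim_equal_generate_regex_patterns_py := by
  intro s n _ hpre
  unfold Pre_generate_regex_patterns_py at hpre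
  unfold Spec_generate_regex_patterns_py generate_regex_patterns_py generate_regex_patterns_py_alt
  rw [if_pos hpre, if_pos hpre]
  rw [foldl_append_map, List.nil_append, altRec_eq, ← combos_range_pats s.toList n.toNat]
  simp [List.map_map, Function.comp]
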